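-- pv_equiv track=rewrite | github.com/jsc-coding-sandbox/unit-tests-python | lib/shop.py | format_data_for_display
-- ===== SOURCE A (Python) =====
-- def format_data_for_display(data: list):
--     display = ""
--     for item in data:
--         display += (f"Product Name:\t{item.get('product_name')}\n"
--                     + f"Price:\t{item.get('price')}\n"
--                     + f"Type:\t{item.get('type')}\n"
--                     + f"Company:\t{item.get('company')}\n"
--                     )
--     return display
-- ===== SOURCE B (Python) =====
-- FIELDS = [("Product Name", "product_name"), ("Price", "price"),
--           ("Type", "type"), ("Company", "company")]
--
--
-- def format_data_for_display(data: list):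
--     # Column-major: one full pass over data per field, then transpose back
--     # into per-item blocks with zip. All columns have length len(data),
--     # so zip loses nothing and the row order is restored exactly.
--     columns = [[f"{label}:\t{item.get(key)}\n" for item in data]
--                for label, key in FIELDS]
--     return "".join(line for block in zip(*columns) for line in block)
-- ===== Notes on version B (the rewrite author's own statement) =====
-- stated objective: alternative
-- what changed: A builds the output row-by-row with one hardcoded four-line concatenation per item; B builds it column-major (one full pass over the data per field, yielding four parallel line columns) and recovers the per-item blocks by transposing with zip(*columns) before a single join.
import Mathlib
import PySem

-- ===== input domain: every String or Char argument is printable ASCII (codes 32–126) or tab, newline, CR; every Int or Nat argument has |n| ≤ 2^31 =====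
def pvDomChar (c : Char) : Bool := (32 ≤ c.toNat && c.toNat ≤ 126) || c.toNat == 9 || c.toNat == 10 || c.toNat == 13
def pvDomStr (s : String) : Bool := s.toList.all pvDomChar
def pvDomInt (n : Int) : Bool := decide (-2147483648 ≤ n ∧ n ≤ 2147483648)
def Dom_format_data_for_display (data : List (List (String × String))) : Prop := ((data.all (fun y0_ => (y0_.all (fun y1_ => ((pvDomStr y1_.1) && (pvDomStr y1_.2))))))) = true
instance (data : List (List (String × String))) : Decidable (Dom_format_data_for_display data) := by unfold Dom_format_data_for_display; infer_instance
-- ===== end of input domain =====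

-- B builds the output column-major (one pass over data per field, four parallel
-- line columns) and transposes back with zip before one join; same O(n) cost.

-- item.get(k): first match in the association list; a missing key renders as "None" in the f-string.
def pvGetStr (item : List (String × String)) (k : String) : String :=
  match item.find? (fun p => p.1 == k) with
  | some p => p.2
  | none => "None"

-- ===== PORT A =====
def format_data_for_display (data : List (List (String × String))) : String :=
  data.foldl (fun display item =>
    display ++ (("Product Name:\t" ++ pvGetStr item "product_name" ++ "\n")
      ++ ("Price:\t" ++ pvGetStr item "price" ++ "\n")
      ++ ("Type:\t" ++ pvGetStr item "type" ++ "\n")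
      ++ ("Company:\t" ++ pvGetStr item "company" ++ "\n"))) ""

-- ===== PORT B =====
def pvFields : List (String × String) :=
  [("Product Name", "product_name"), ("Price", "price"), ("Type", "type"), ("Company", "company")]

-- zip(*columns) for four columns, flattened: truncates at the shortest, like Python's zip.
def pvInterleave4 : List String → List String → List String → List String → List String
  | a :: as, b :: bs, c :: cs, d :: ds => a :: b :: c :: d :: pvInterleave4 as bs cs ds
  | _, _, _, _ => []

def format_data_for_display_alt (data : List (List (String × String))) : String :=
  let columns := pvFields.map (fun lk =>
    data.map (fun item => lk.1 ++ ":\t" ++ pvGetStr item lk.2 ++ "\n"))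
  match columns with
  | [c1, c2, c3, c4] => PySem.Str.join "" (pvInterleave4 c1 c2 c3 c4)
  | _ => ""

-- ===== PRECONDITION & SPEC =====
def Spec_format_data_for_display (data : List (List (String × String))) (out : String) : Prop := out = format_data_for_display_alt data
instance (data : List (List (String × String))) (out : String) : Decidable (Spec_format_data_for_display data out) := by unfold Spec_format_data_for_display; infer_instance

-- ===== CLAIM (what is proved, stated in full; the proofs are below) =====
def Claim_equal_format_data_for_display : Prop := ∀ (data : List (List (String × String))), Dom_format_data_for_display data → Spec_format_data_for_display data (format_data_for_display data)

-- ===== LEMMAS AND PROOFS =====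

theorem joinNil_nil : PySem.Str.join "" ([] : List String) = "" := by decide

theorem charsJoinNil_cons (x : List Char) (xs : List (List Char)) :
    PySem.Chars.join [] (x :: xs) = x ++ PySem.Chars.join [] xs := by
  cases xs with
  | nil => simp [PySem.Chars.join_singleton, PySem.Chars.join_nil]
  | cons b l => rw [PySem.Chars.join_cons_cons]; simp

theorem joinNil_cons (s : String) (l : List String) :
    PySem.Str.join "" (s :: l) = s ++ PySem.Str.join "" l := by
  simp [PySem.Str.join, charsJoinNil_cons]

def pvBlock (item : List (String × String)) : String :=
  ("Product Name:\t" ++ pvGetStr item "product_name" ++ "\n")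
    ++ ("Price:\t" ++ pvGetStr item "price" ++ "\n")
    ++ ("Type:\t" ++ pvGetStr item "type" ++ "\n")
    ++ ("Company:\t" ++ pvGetStr item "company" ++ "\n")

theorem joined_interleave (data : List (List (String × String))) :
    PySem.Str.join "" (pvInterleave4
        (data.map (fun item => "Product Name:\t" ++ pvGetStr item "product_name" ++ "\n"))
        (data.map (fun item => "Price:\t" ++ pvGetStr item "price" ++ "\n"))
        (data.map (fun item => "Type:\t" ++ pvGetStr item "type" ++ "\n"))
        (data.map (fun item => "Company:\t" ++ pvGetStr item "company" ++ "\n")))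
      = data.foldr (fun item acc => pvBlock item ++ acc) "" := by
  induction data with
  | nil => simp [pvInterleave4, joinNil_nil]
  | cons item rest ih =>
    simp only [List.map_cons, pvInterleave4, List.foldr_cons, joinNil_cons, ih]
    simp [pvBlock, String.append_assoc]

theorem foldA_eq (data : List (List (String × String))) (s : String) :
    data.foldl (fun display item => display ++ pvBlock item) s
      = s ++ data.foldr (fun item acc => pvBlock item ++ acc) "" := by
  induction data generalizing s with
  | nil => simp
  | cons item rest ih =>
    simp only [List.foldl_cons, List.foldr_cons, ih, String.append_assoc]

-- ===== VERDICT (by name: the statement is the Claim_ definition above) =====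
theorem format_data_for_display_spec : Claim_equal_format_data_for_display := by
  intro data _
  unfold Spec_format_data_for_display format_data_for_display format_data_for_display_alt
  simp only [pvFields, List.map_cons, List.map_nil]
  rw [show (fun (display : String) item =>
      display ++ (("Product Name:\t" ++ pvGetStr item "product_name" ++ "\n")
        ++ ("Price:\t" ++ pvGetStr item "price" ++ "\n")
        ++ ("Type:\t" ++ pvGetStr item "type" ++ "\n")
        ++ ("Company:\t" ++ pvGetStr item "company" ++ "\n")))
      = (fun display item => display ++ pvBlock item) from rfl]
  rw [foldA_eq]
  have h := joined_interleave data
  simp only [String.append_assoc] at h ⊢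
  exact h.symm
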